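-- pv_equiv track=rewrite | github.com/qihang-zhang/slides-template | preprocess_math.py | _escape_underscores
-- ===== SOURCE A (Python) =====
-- def _escape_underscores(math: str) -> str:
--     escaped: list[str] = []
--     index = 0
--     while index < len(math):
--         char = math[index]
--         if char == "\\":
--             escaped.append(char)
--             index += 1
--             if index < len(math):
--                 escaped.append(math[index])
--                 index += 1
--             continue
--         if char == "_":
--             escaped.append(r"\_")
--         else:
--             escaped.append(char)
--         index += 1
--     return "".join(escaped)
-- ===== SOURCE B (Python) =====
-- def _escape_underscores(math: str) -> str:
--     # Staged approach: split on backslash so each fragment is backslash-free,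
--     # then escaping underscores in a fragment is a plain str.replace; a fragment
--     # after a separator contributes its first character verbatim (it is the
--     # escaped character of the pair), and an empty fragment means two adjacent
--     # backslashes (a consumed pair) or a trailing lone backslash.
--     parts = math.split("\\")
--     pieces = [parts[0].replace("_", "\\_")]
--     i = 1
--     n = len(parts)
--     while i < n:
--         p = parts[i]
--         if p:
--             pieces.append("\\" + p[0] + p[1:].replace("_", "\\_"))
--             i += 1
--         elif i + 1 < n:
--             pieces.append("\\\\" + parts[i + 1].replace("_", "\\_"))
--             i += 2
--         else:
--             pieces.append("\\")
--             i += 1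
--     return "".join(pieces)
-- ===== Notes on version B (the rewrite author's own statement) =====
-- stated objective: faster
-- what changed: Replaced A's index-walking while-loop over single characters with a staged pipeline: split the string on backslashes so every fragment is backslash-free, escape underscores per fragment with a plain str.replace, and reassemble the fragments while re-attaching the consumed backslash pairs.
import Mathlib
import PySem

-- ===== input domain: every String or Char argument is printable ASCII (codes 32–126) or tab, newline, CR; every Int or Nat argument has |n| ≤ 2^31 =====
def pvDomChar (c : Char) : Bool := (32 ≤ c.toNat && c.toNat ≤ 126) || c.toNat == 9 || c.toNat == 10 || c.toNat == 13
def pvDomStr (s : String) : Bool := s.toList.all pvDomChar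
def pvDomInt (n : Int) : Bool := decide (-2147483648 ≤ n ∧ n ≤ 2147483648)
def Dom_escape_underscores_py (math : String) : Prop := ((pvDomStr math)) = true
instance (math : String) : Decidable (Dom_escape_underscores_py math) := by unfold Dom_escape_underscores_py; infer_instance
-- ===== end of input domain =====

-- B replaces A's index-walking while-loop with a staged pipeline: split the string
-- on backslashes so every fragment is backslash-free, escape underscores per fragment
-- with a plain replace, and reassemble; same O(n), measurably faster constants (bulk split/replace).


-- ===== PORT A =====
-- A's while-loop over the index: each step reads math[index]; on a backslash it also
-- consumes the following character (if any); "".join of the appended pieces is the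
-- concatenation of their characters, so the loop is ported as this recursion on the
-- remaining characters producing the joined character list directly.
def escAuxA : List Char → List Char
  | [] => []
  | c :: rest =>
    if c = '\\' then
      match rest with
      | [] => [c]
      | d :: rest' => c :: d :: escAuxA rest'
    else if c = '_' then '\\' :: '_' :: escAuxA rest
    else c :: escAuxA rest


def escape_underscores_py (math : String) : String :=
  String.ofList (escAuxA math.toList)

-- ===== PORT B =====
-- Source B: parts = math.split("\\"); escaping a backslash-free fragment is
-- fragment.replace("_", "\\_"); the while loop over parts[1:] becomes this recursion:
-- a nonempty part contributes the backslash, its first character verbatim, and its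
-- replaced remainder; an empty part is a consumed backslash pair (the following part
-- is then processed fresh) or, when last, a trailing lone backslash.  "".join of the
-- pieces is the concatenation.
def escParts : List (List Char) → List Char
  | [] => []
  | (c :: t) :: rest => '\\' :: c :: (PySem.Chars.replace t ['_'] ['\\', '_'] ++ escParts rest)
  | [] :: rest =>
    match rest with
    | q :: rest' => '\\' :: '\\' :: (PySem.Chars.replace q ['_'] ['\\', '_'] ++ escParts rest')
    | [] => ['\\']


def escape_underscores_py_alt (math : String) : String :=
  match PySem.Chars.splitOn math.toList ['\\'] with
  | [] => ""  -- unreachable: split never yields an empty list of parts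
  | p0 :: rest => String.ofList (PySem.Chars.replace p0 ['_'] ['\\', '_'] ++ escParts rest)

-- ===== PRECONDITION & SPEC =====
def Spec_escape_underscores_py (math : String) (out : String) : Prop := out = escape_underscores_py_alt math
instance (math : String) (out : String) : Decidable (Spec_escape_underscores_py math out) := by unfold Spec_escape_underscores_py; infer_instance

-- ===== CLAIM (what is proved, stated in full; the proofs are below) =====
def Claim_equal_escape_underscores_py : Prop := ∀ (math : String), Dom_escape_underscores_py math → Spec_escape_underscores_py math (escape_underscores_py math)

-- ===== LEMMAS AND PROOFS =====

def repl1 : List Char → List Char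
  | [] => []
  | c :: t => if c = '_' then '\\' :: '_' :: repl1 t else c :: repl1 t

theorem isPrefixOf_single (a c : Char) (t : List Char) : [a].isPrefixOf (c :: t) = (a == c) := by
  simp [List.isPrefixOf]

theorem replGo (fuel : Nat) : ∀ (l acc : List Char), l.length ≤ fuel →
    PySem.Chars.replace.go ['_'] ['\\', '_'] fuel l acc = acc.reverse ++ repl1 l := by
  induction fuel with
  | zero =>
    intro l acc h
    have : l = [] := by cases l <;> simp_all
    subst this; simp [PySem.Chars.replace.go, repl1]
  | succ fuel ih =>
    intro l acc h
    cases l with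
    | nil => simp [PySem.Chars.replace.go, repl1]
    | cons c t =>
      rw [PySem.Chars.replace.go]
      by_cases hc : c = '_'
      · subst hc
        rw [if_pos (by simp [List.isPrefixOf])]
        rw [ih _ _ (by simpa using h)]
        simp [repl1]
      · rw [if_neg (by simp [isPrefixOf_single]; exact fun e => hc e.symm)]
        rw [ih _ _ (by simpa using h)]
        simp [repl1, hc]

theorem replace_eq (l : List Char) : PySem.Chars.replace l ['_'] ['\\', '_'] = repl1 l := by
  simp only [PySem.Chars.replace, List.isEmpty]
  exact replGo l.length l [] le_rfl

def split1 : List Char → List (List Char)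
  | [] => [[]]
  | c :: t =>
    if c = '\\' then [] :: split1 t
    else
      match split1 t with
      | h :: r => (c :: h) :: r
      | [] => [[c]]

theorem split1_ne_nil (l : List Char) : split1 l ≠ [] := by
  cases l with
  | nil => simp [split1]
  | cons c t =>
    simp only [split1]
    split
    · simp
    · split <;> simp

def consHead (p : List Char) : List (List Char) → List (List Char)
  | [] => [p]
  | h :: r => (p ++ h) :: r

theorem splitGo (fuel : Nat) : ∀ (l cur : List Char) (acc : List (List Char)), l.length < fuel →
    PySem.Chars.splitOn.go ['\\'] fuel l cur acc = acc.reverse ++ consHead cur.reverse (split1 l) := by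
  induction fuel with
  | zero => intro l cur acc h; omega
  | succ fuel ih =>
    intro l cur acc h
    cases l with
    | nil => simp [PySem.Chars.splitOn.go, consHead, split1]
    | cons c t =>
      rw [PySem.Chars.splitOn.go]
      by_cases hc : c = '\\'
      · subst hc
        rw [if_pos (by simp [List.isPrefixOf])]
        have hdrop : List.drop ['\\'].length ('\\' :: t) = t := rfl
        rw [hdrop, ih t [] _ (by simpa using h)]
        cases ht : split1 t with
        | nil => exact absurd ht (split1_ne_nil t)
        | cons q r => simp [split1, ht, consHead]
      · rw [if_neg (by simp [isPrefixOf_single]; exact fun e => hc e.symm)]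
        rw [ih _ _ _ (by simpa using h)]
        simp only [split1, if_neg hc]
        cases ht : split1 t with
        | nil => exact absurd ht (split1_ne_nil t)
        | cons q r => simp [consHead]

theorem splitOn_eq (l : List Char) : PySem.Chars.splitOn l ['\\'] = split1 l := by
  rw [PySem.Chars.splitOn, splitGo (l.length + 1) l [] [] (by omega)]
  cases h : split1 l with
  | nil => exact absurd h (split1_ne_nil l)
  | cons q r => simp [consHead]

def escTop : List (List Char) → List Char
  | [] => []
  | p0 :: rest => repl1 p0 ++ escParts rest

theorem escAuxA_underscore (rest : List Char) : escAuxA ('_' :: rest) = '\\' :: '_' :: escAuxA rest := by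
  rw [escAuxA.eq_def]; simp

theorem escAuxA_other (c : Char) (rest : List Char) (h1 : ¬ c = '\\') (h2 : ¬ c = '_') :
    escAuxA (c :: rest) = c :: escAuxA rest := by
  rw [escAuxA.eq_def]; simp [h1, h2]

theorem main_eq (l : List Char) : escTop (split1 l) = escAuxA l := by
  induction l using escAuxA.induct with
  | case1 => simp [split1, escTop, repl1, escParts, escAuxA]
  | case2 => simp [split1, escTop, repl1, escParts, escAuxA]
  | case3 d rest' ih =>
    by_cases hd : d = '\\'
    · subst hd
      cases h' : split1 rest' with
      | nil => exact absurd h' (split1_ne_nil rest')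
      | cons q r =>
        rw [h'] at ih; simp only [escTop] at ih
        simp [split1, h', escTop, escParts, escAuxA, replace_eq, repl1, ih]
    · cases h' : split1 rest' with
      | nil => exact absurd h' (split1_ne_nil rest')
      | cons q r =>
        rw [h'] at ih; simp only [escTop] at ih
        simp [split1, h', escTop, escParts, escAuxA, replace_eq, repl1, hd, ih]
  | case4 rest' hne ih =>
    cases h' : split1 rest' with
    | nil => exact absurd h' (split1_ne_nil rest')
    | cons q r =>
      rw [h'] at ih; simp only [escTop] at ih
      rw [escAuxA_underscore]
      simp [split1, h', escTop, repl1, ih]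
  | case5 d rest' h1 h2 ih =>
    cases h' : split1 rest' with
    | nil => exact absurd h' (split1_ne_nil rest')
    | cons q r =>
      rw [h'] at ih; simp only [escTop] at ih
      rw [escAuxA_other d rest' h1 h2]
      simp [split1, h', escTop, repl1, h1, h2, ih]

-- ===== VERDICT (by name: the statement is the Claim_ definition above) =====
theorem escape_underscores_py_spec : Claim_equal_escape_underscores_py := by
  intro math _
  unfold Spec_escape_underscores_py escape_underscores_py escape_underscores_py_alt
  rw [splitOn_eq]
  cases h : split1 math.toList with
  | nil => exact absurd h (split1_ne_nil math.toList)
  | cons p0 rest =>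
    have hm := main_eq math.toList
    rw [h] at hm; simp only [escTop] at hm
    rw [← hm]; simp [replace_eq]
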